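-- pv_equiv track=rewrite | github.com/ZrjaK/algorithm | OJ/leetcode/2178.拆分成最多数目的正偶数之和.py | maximumEvenSplit
-- ===== SOURCE A (Python) =====
-- from typing import List
--
-- def maximumEvenSplit(finalSum: int) -> List[int]:
--     if finalSum % 2 == 1:
--         return []
--     r = []
--     s = 0
--     for i in range(2, finalSum+1,2):
--         if s + i > finalSum:
--             break
--         r.append(i)
--         s += i
--     if r:
--         r[-1] += finalSum - s
--     return r
-- ===== SOURCE B (Python) =====
-- from typing import List
--
-- def maximumEvenSplit(finalSum: int) -> List[int]:
--     # Closed-form: k = largest k with k*(k+1) <= finalSum, found from a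
--     # float-sqrt guess corrected by two short adjustment loops.
--     if finalSum % 2 == 1 or finalSum < 2:
--         return []
--     k = int(finalSum ** 0.5)
--     while k * (k + 1) > finalSum:
--         k -= 1
--     while (k + 1) * (k + 2) <= finalSum:
--         k += 1
--     return [2 * i for i in range(1, k)] + [finalSum - k * (k - 1)]
-- ===== Notes on version B (the rewrite author's own statement) =====
-- stated objective: alternative
-- what changed: Replaces A's accumulate-and-break loop by a closed-form derivation of the addend count k (sqrt guess corrected to the largest k with k*(k+1) <= finalSum), then emits the list in one comprehension with the remainder folded into the last element.
import Mathlib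
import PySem

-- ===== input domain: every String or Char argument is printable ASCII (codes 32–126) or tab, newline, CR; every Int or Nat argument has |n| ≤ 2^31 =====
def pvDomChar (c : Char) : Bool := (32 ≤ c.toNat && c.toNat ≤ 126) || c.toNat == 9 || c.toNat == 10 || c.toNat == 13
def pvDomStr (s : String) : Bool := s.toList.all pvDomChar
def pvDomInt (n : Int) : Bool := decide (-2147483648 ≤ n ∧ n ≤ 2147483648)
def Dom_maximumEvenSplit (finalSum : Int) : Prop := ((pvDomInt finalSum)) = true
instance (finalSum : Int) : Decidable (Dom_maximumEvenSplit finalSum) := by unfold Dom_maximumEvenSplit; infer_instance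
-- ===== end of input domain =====

-- B replaces A's accumulate-and-break loop by a closed-form derivation of the addend
-- count k (sqrt guess corrected to the largest k with k*(k+1) <= finalSum); alternative
-- decomposition, same asymptotic cost.

-- ===== PORT A =====
-- the for-loop with break of A: i runs over range(2, finalSum+1, 2), state (r, s)
def maximumEvenSplitGo (n i : Int) (r : List Int) (s : Int) : List Int × Int :=
  if _h : i ≤ n then
    if s + i > n then (r, s)
    else maximumEvenSplitGo n (i + 2) (r ++ [i]) (s + i)
  else (r, s)
termination_by (n + 1 - i).toNat
decreasing_by omega

def maximumEvenSplit (finalSum : Int) : List Int :=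
  if PySem.Int.mod finalSum 2 == 1 then []
  else
    let p := maximumEvenSplitGo finalSum 2 [] 0
    -- `if r: r[-1] += finalSum - s`
    match p.1.getLast? with
    | some v => p.1.dropLast ++ [v + (finalSum - p.2)]
    | none => p.1

-- ===== PORT B =====
-- `while k * (k + 1) > finalSum: k -= 1`  (the k ≤ 0 exit only makes the recursion
-- total; it is never reached at B's call site, where 0 ≤ k and 2 ≤ n)
def maximumEvenSplitDec (n k : Int) : Int :=
  if k ≤ 0 then k
  else if k * (k + 1) > n then maximumEvenSplitDec n (k - 1) else k
termination_by k.toNat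
decreasing_by omega

-- `while (k + 1) * (k + 2) <= finalSum: k += 1`
def maximumEvenSplitInc (n k : Int) : Int :=
  if h : (k + 1) * (k + 2) ≤ n then maximumEvenSplitInc n (k + 1) else k
termination_by (n - k).toNat
decreasing_by
  have hlt : k < n := by nlinarith [sq_nonneg (k + 1)]
  omega

-- `int(finalSum ** 0.5)` ported as integer sqrt: exact for 0 ≤ finalSum ≤ 2^31
def maximumEvenSplit_alt (finalSum : Int) : List Int :=
  if PySem.Int.mod finalSum 2 == 1 || finalSum < 2 then []
  else
    let k := maximumEvenSplitInc finalSum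
      (maximumEvenSplitDec finalSum ((Nat.sqrt finalSum.toNat : Nat) : Int))
    (PySem.List.pyRange 1 k 1).map (fun i => 2 * i) ++ [finalSum - k * (k - 1)]

-- ===== PRECONDITION & SPEC =====
def Spec_maximumEvenSplit (finalSum : Int) (out : List Int) : Prop := out = maximumEvenSplit_alt finalSum
instance (finalSum : Int) (out : List Int) : Decidable (Spec_maximumEvenSplit finalSum out) := by unfold Spec_maximumEvenSplit; infer_instance

-- ===== CLAIM (what is proved, stated in full; the proofs are below) =====
def Claim_equal_maximumEvenSplit : Prop := ∀ (finalSum : Int), Dom_maximumEvenSplit finalSum → Spec_maximumEvenSplit finalSum (maximumEvenSplit finalSum)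

-- ===== LEMMAS AND PROOFS =====

-- the decrement loop keeps 0 ≤ k and lands on k with k*(k+1) ≤ n
theorem maximumEvenSplitDec_spec (n : Int) (hn : 0 ≤ n) :
    ∀ k : Int, 0 ≤ k → 0 ≤ maximumEvenSplitDec n k ∧
      (maximumEvenSplitDec n k) * (maximumEvenSplitDec n k + 1) ≤ n := by
  have hmeas : ∀ m : Nat, ∀ k : Int, k.toNat = m → 0 ≤ k →
      0 ≤ maximumEvenSplitDec n k ∧
      (maximumEvenSplitDec n k) * (maximumEvenSplitDec n k + 1) ≤ n := by
    intro m
    induction m using Nat.strong_induction_on with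
    | _ m ih =>
      intro k hm hk
      rw [maximumEvenSplitDec]
      split
      · have hk0 : k = 0 := by omega
        subst hk0; simpa using hn
      · split
        · exact ih ((k - 1).toNat) (by omega) (k - 1) rfl (by omega)
        · exact ⟨hk, by omega⟩
  intro k hk
  exact hmeas k.toNat k rfl hk

-- the increment loop reaches the maximal k with k*(k+1) ≤ n
theorem maximumEvenSplitInc_spec (n : Int) :
    ∀ k : Int, 0 ≤ k → k * (k + 1) ≤ n →
      0 ≤ maximumEvenSplitInc n k ∧
      (maximumEvenSplitInc n k) * (maximumEvenSplitInc n k + 1) ≤ n ∧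
      n < (maximumEvenSplitInc n k + 1) * (maximumEvenSplitInc n k + 2) := by
  intro k hk hkn
  have hmeas : ∀ m : Nat, ∀ k : Int, (n - k).toNat = m → 0 ≤ k → k * (k + 1) ≤ n →
      0 ≤ maximumEvenSplitInc n k ∧
      (maximumEvenSplitInc n k) * (maximumEvenSplitInc n k + 1) ≤ n ∧
      n < (maximumEvenSplitInc n k + 1) * (maximumEvenSplitInc n k + 2) := by
    intro m
    induction m using Nat.strong_induction_on with
    | _ m ih =>
      intro k hm hk hkn
      rw [maximumEvenSplitInc]
      split
      · rename_i h
        have hlt : k < n := by nlinarith [sq_nonneg (k + 1)]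
        exact ih ((n - (k + 1)).toNat) (by omega) (k + 1) rfl (by omega) (by linarith)
      · rename_i h
        exact ⟨hk, hkn, by linarith⟩
  exact hmeas ((n - k).toNat) k rfl hk hkn

-- the combined characterisation of B's k
theorem altK_spec (n : Int) (hn : 2 ≤ n) :
    let k := maximumEvenSplitInc n (maximumEvenSplitDec n ((Nat.sqrt n.toNat : Nat) : Int))
    1 ≤ k ∧ k * (k + 1) ≤ n ∧ n < (k + 1) * (k + 2) := by
  intro k
  have hd := maximumEvenSplitDec_spec n (by omega) ((Nat.sqrt n.toNat : Nat) : Int) (by positivity)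
  have hi := maximumEvenSplitInc_spec n _ hd.1 hd.2
  refine ⟨?_, hi.2.1, hi.2.2⟩
  by_contra h
  have hk0 : maximumEvenSplitInc n (maximumEvenSplitDec n ((Nat.sqrt n.toNat : Nat) : Int)) = 0 := by omega
  rw [hk0] at hi
  omega

-- A's loop, started after j addends (sum j*(j+1)), appends 2*(j+1) … 2*m and stops
theorem maximumEvenSplitGo_spec (n m : Int) (hm : 0 ≤ m)
    (h1 : m * (m + 1) ≤ n) (h2 : n < (m + 1) * (m + 2)) :
    ∀ (j : Int) (r : List Int), 0 ≤ j → j ≤ m →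
      maximumEvenSplitGo n (2 * j + 2) r (j * (j + 1)) =
        (r ++ (PySem.List.pyRange (j + 1) (m + 1) 1).map (fun i => 2 * i), m * (m + 1)) := by
  intro j r hj hjm
  have hmeas : ∀ d : Nat, ∀ (j : Int) (r : List Int), (m - j).toNat = d → 0 ≤ j → j ≤ m →
      maximumEvenSplitGo n (2 * j + 2) r (j * (j + 1)) =
        (r ++ (PySem.List.pyRange (j + 1) (m + 1) 1).map (fun i => 2 * i), m * (m + 1)) := by
    intro d
    induction d using Nat.strong_induction_on with
    | _ d ih =>
      intro j r hd hj hjm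
      rcases eq_or_lt_of_le hjm with heq | hlt
      · -- j = m : the next addend would overflow (or be outside the range): stop
        subst heq
        unfold maximumEvenSplitGo
        rw [PySem.List.pyRange_one_eq_nil (by omega)]
        split
        · have : j * (j + 1) + (2 * j + 2) > n := by nlinarith
          simp [this]
        · simp
      · -- j < m : the addend 2*(j+1) fits; recurse
        have hstep : (j + 1) * (j + 2) ≤ m * (m + 1) := by nlinarith
        have hin : 2 * j + 2 ≤ n := by nlinarith
        have hnob : ¬ (j * (j + 1) + (2 * j + 2) > n) := by nlinarith
        unfold maximumEvenSplitGo
        rw [dif_pos hin, if_neg hnob]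
        have harith1 : 2 * j + 2 + 2 = 2 * (j + 1) + 2 := by ring
        have harith2 : j * (j + 1) + (2 * j + 2) = (j + 1) * ((j + 1) + 1) := by ring
        have hdec : (m - (j + 1)).toNat < d := by omega
        rw [harith1, harith2,
          ih ((m - (j + 1)).toNat) hdec (j + 1) (r ++ [2 * j + 2]) rfl (by omega) (by omega)]
        have hsplit : PySem.List.pyRange (j + 1) (m + 1) 1
            = (j + 1) :: PySem.List.pyRange (j + 1 + 1) (m + 1) 1 :=
          PySem.List.pyRange_one_cons (by omega)
        rw [hsplit]
        simp only [List.map_cons, List.append_assoc, List.singleton_append, Prod.mk.injEq,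
          List.append_cancel_left_eq, List.cons.injEq]
        and_intros <;> first | ring | rfl | trivial
  exact hmeas ((m - j).toNat) j r rfl hj hjm

-- ===== VERDICT (by name: the statement is the Claim_ definition above) =====
theorem maximumEvenSplit_spec : Claim_equal_maximumEvenSplit := by
  unfold Claim_equal_maximumEvenSplit
  intro n _
  unfold Spec_maximumEvenSplit maximumEvenSplit maximumEvenSplit_alt
  have hmod : PySem.Int.mod n 2 = n % 2 := PySem.Int.mod_eq_emod_of_pos (by norm_num)
  by_cases hodd : n % 2 = 1
  · simp [hodd]
  · by_cases hsmall : n < 2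
    · -- even n < 2: A's range is empty, r = [], both return []
      have hA : maximumEvenSplitGo n 2 [] 0 = ([], 0) := by
        rw [maximumEvenSplitGo]; rw [dif_neg (by omega)]
      have hle : n < 2 := hsmall
      simp [hodd, hA, hle]
    · -- even n ≥ 2
      replace hsmall : 2 ≤ n := by omega
      have hk := altK_spec n hsmall
      set k := maximumEvenSplitInc n (maximumEvenSplitDec n ((Nat.sqrt n.toNat : Nat) : Int)) with hkdef
      obtain ⟨hk1, hkle, hklt⟩ := hk
      have hgo := maximumEvenSplitGo_spec n k (by omega) hkle hklt 0 [] le_rfl (by omega)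
      simp only [show (2:Int) * 0 + 2 = 2 by ring, show (0:Int) * (0 + 1) = 0 by ring,
        List.nil_append] at hgo
      have hnot2 : ¬ (n < 2) := by omega
      simp only [hmod, hodd, hnot2, beq_iff_eq, if_false, Bool.or_eq_true,
        decide_eq_true_eq, or_self, hgo, zero_add]
      -- split [2,4,...,2k] into [2,...,2(k-1)] ++ [2k]
      have hsplit : PySem.List.pyRange 1 (k + 1) 1
          = PySem.List.pyRange 1 k 1 ++ [k] := by
        have := PySem.List.pyRange_one_succ_right (a := 1) (b := k) (by omega)
        simpa using this
      rw [hsplit]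
      simp only [List.map_append, List.map_cons, List.map_nil, List.getLast?_concat,
        List.dropLast_concat]
      have harith : 2 * k + (n - k * (k + 1)) = n - k * (k - 1) := by ring
      simp [harith]
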